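-- pv_equiv track=rewrite | github.com/g1-tommy/AlgorithmChallenges | Baekjoon/1407.py | f
-- ===== SOURCE A (Python) =====
-- def f(num):
--     r = num
--     i = 0
--     while True:
--         i += 1
--         if 2 ** i > num:
--             break
--         r += (num // (2 ** i)) * ((2 ** i) // 2)
--     return r
-- ===== SOURCE B (Python) =====
-- def f(num):
--     # Divide-and-conquer: recurse on the halved argument instead of iterating powers of two.
--     # f(n) = n - n//2 + 2*f(n//2), base n < 2.
--     if num < 2:
--         return num
--     h = num // 2
--     return num - h + 2 * f(h)
-- ===== Notes on version B (the rewrite author's own statement) =====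
-- stated objective: alternative
-- what changed: Replaced the loop that iterates an exponentially growing power index (recomputing the power and two divisions per step) by a divide-and-conquer recurrence on the halved argument, f(n) = n - n//2 + 2*f(n//2), with the base case returning n when the loop would never run.
import Mathlib
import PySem

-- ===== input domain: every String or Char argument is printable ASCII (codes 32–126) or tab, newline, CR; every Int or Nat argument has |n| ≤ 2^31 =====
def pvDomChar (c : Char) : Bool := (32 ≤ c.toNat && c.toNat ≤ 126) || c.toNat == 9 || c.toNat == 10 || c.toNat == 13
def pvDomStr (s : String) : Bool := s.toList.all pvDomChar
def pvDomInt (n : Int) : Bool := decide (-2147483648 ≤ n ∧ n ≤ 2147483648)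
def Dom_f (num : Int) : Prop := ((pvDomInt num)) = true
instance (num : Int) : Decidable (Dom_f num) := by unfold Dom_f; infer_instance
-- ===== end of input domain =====

-- B replaces A's loop over growing powers of two by the halving recurrence f(n) = n - n//2 + 2*f(n//2) (alternative decomposition, same asymptotic cost).


-- ===== PORT A =====
-- the 'while True' loop: i is incremented first, then the break test, then the accumulation
def fLoop (num r : Int) (i : Nat) : Int :=
  if (2:Int) ^ (i + 1) > num then r
  else fLoop num (r + (PySem.Int.floordiv num ((2:Int) ^ (i + 1))) *
                      (PySem.Int.floordiv ((2:Int) ^ (i + 1)) 2)) (i + 1)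
termination_by num.toNat / 2 ^ i
decreasing_by
  rename_i h
  push_neg at h
  have h2 : (2 : Int) ^ (i + 1) ≤ num := h
  have hn : 2 ^ (i + 1) ≤ num.toNat := by
    have : ((2 ^ (i + 1) : Nat) : Int) ≤ num := by push_cast; exact h2
    omega
  have h1 : 1 ≤ num.toNat / 2 ^ i := by
    have : 2 ^ i ≤ num.toNat := le_trans (Nat.pow_le_pow_right (by norm_num) (Nat.le_succ i)) hn
    exact (Nat.one_le_div_iff (Nat.pow_pos (n := i) (by norm_num))).2 this
  calc num.toNat / 2 ^ (i + 1) = num.toNat / 2 ^ i / 2 := by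
        rw [Nat.div_div_eq_div_mul, pow_succ]
    _ < num.toNat / 2 ^ i := Nat.div_lt_self (by omega) (by norm_num)

def f (num : Int) : Int := fLoop num num 0

-- ===== PORT B =====
def f_alt (num : Int) : Int :=
  if num < 2 then num
  else
    let h := PySem.Int.floordiv num 2
    num - h + 2 * f_alt h
termination_by num.toNat
decreasing_by
  rename_i hlt
  push_neg at hlt
  have : PySem.Int.floordiv num 2 = num / 2 := PySem.Int.floordiv_eq_ediv_of_pos (by norm_num)
  rw [this]; omega

-- ===== PRECONDITION & SPEC =====
def Spec_f (num : Int) (out : Int) : Prop := out = f_alt num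
instance (num : Int) (out : Int) : Decidable (Spec_f num out) := by unfold Spec_f; infer_instance

-- ===== CLAIM (what is proved, stated in full; the proofs are below) =====
def Claim_equal_f : Prop := ∀ (num : Int), Dom_f num → Spec_f num (f num)

-- ===== LEMMAS AND PROOFS =====

-- one unfolding of the loop, with explicit arguments (so rewrites hit the intended occurrence)
theorem fLoop_eq (num r : Int) (i : Nat) :
    fLoop num r i =
      if (2:Int) ^ (i + 1) > num then r
      else fLoop num (r + (PySem.Int.floordiv num ((2:Int) ^ (i + 1))) *
                          (PySem.Int.floordiv ((2:Int) ^ (i + 1)) 2)) (i + 1) := by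
  rw [fLoop]

theorem pow_le_toNat {num : Int} {j : Nat} (h : (2:Int) ^ j ≤ num) : 2 ^ j ≤ num.toNat := by
  have : ((2 ^ j : Nat) : Int) ≤ num := by push_cast; exact h
  omega

theorem toNat_lt_pow {num : Int} {i : Nat} (h : num.toNat / 2 ^ i = 0) : num.toNat < 2 ^ i := by
  rcases (Nat.div_eq_zero_iff).1 h with h' | h'
  · exact absurd h' (Nat.pow_pos (by norm_num)).ne'
  · exact h'

theorem div_pow_lt {num : Int} {i : Nat} (h : (2:Int) ^ (i + 1) ≤ num) :
    num.toNat / 2 ^ (i + 1) < num.toNat / 2 ^ i := by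
  have hn : 2 ^ (i + 1) ≤ num.toNat := pow_le_toNat h
  have h1 : 1 ≤ num.toNat / 2 ^ i := by
    have : 2 ^ i ≤ num.toNat :=
      le_trans (Nat.pow_le_pow_right (by norm_num) (Nat.le_succ i)) hn
    exact (Nat.one_le_div_iff (Nat.pow_pos (by norm_num))).2 this
  calc num.toNat / 2 ^ (i + 1) = num.toNat / 2 ^ i / 2 := by
        rw [Nat.div_div_eq_div_mul, pow_succ]
    _ < num.toNat / 2 ^ i := Nat.div_lt_self (by omega) (by norm_num)

-- the accumulator splits off
theorem fLoop_acc_aux (num : Int) (k : Nat) :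
    ∀ (i : Nat) (r : Int), num.toNat / 2 ^ i ≤ k → fLoop num r i = r + fLoop num 0 i := by
  induction k with
  | zero =>
    intro i r hk
    have hlt : num.toNat < 2 ^ i := toNat_lt_pow (Nat.le_zero.1 hk)
    have hg : (2:Int) ^ (i + 1) > num := by
      have hc : (num.toNat : Int) < ((2 ^ i : Nat) : Int) := by exact_mod_cast hlt
      push_cast at hc
      have : (2:Int) ^ i ≤ 2 ^ (i + 1) := pow_le_pow_right₀ (by norm_num) (by omega)
      omega
    rw [fLoop_eq num r i, if_pos hg, fLoop_eq num 0 i, if_pos hg]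
    ring
  | succ k ih =>
    intro i r hk
    by_cases hg : (2:Int) ^ (i + 1) > num
    · rw [fLoop_eq num r i, if_pos hg, fLoop_eq num 0 i, if_pos hg]; ring
    · push_neg at hg
      have hmeas : num.toNat / 2 ^ (i + 1) ≤ k := by
        have := div_pow_lt hg; omega
      rw [fLoop_eq num r i, if_neg (by push_neg; exact hg),
          fLoop_eq num 0 i, if_neg (by push_neg; exact hg)]
      rw [ih (i + 1) (r + (PySem.Int.floordiv num ((2:Int) ^ (i + 1))) *
            (PySem.Int.floordiv ((2:Int) ^ (i + 1)) 2)) hmeas,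
          ih (i + 1) (0 + (PySem.Int.floordiv num ((2:Int) ^ (i + 1))) *
            (PySem.Int.floordiv ((2:Int) ^ (i + 1)) 2)) hmeas]
      ring

theorem fLoop_acc (num r : Int) (i : Nat) : fLoop num r i = r + fLoop num 0 i :=
  fLoop_acc_aux num (num.toNat / 2 ^ i) i r le_rfl

-- shifting the power index by one is halving the argument (and doubling the sum)
theorem fLoop_shift (num : Int) (k : Nat) : ∀ (i : Nat), num.toNat / 2 ^ i ≤ k →
    fLoop num 0 (i + 1) = 2 * fLoop (PySem.Int.floordiv num 2) 0 i := by
  induction k with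
  | zero =>
    intro i hk
    have hlt : num.toNat < 2 ^ i := toNat_lt_pow (Nat.le_zero.1 hk)
    have hsmall : num < (2:Int) ^ (i + 1 + 1) := by
      have hc : (num.toNat : Int) < ((2 ^ i : Nat) : Int) := by exact_mod_cast hlt
      push_cast at hc
      have : (2:Int) ^ i ≤ 2 ^ (i + 1 + 1) := pow_le_pow_right₀ (by norm_num) (by omega)
      omega
    have hg2 : (2:Int) ^ (i + 1) > PySem.Int.floordiv num 2 := by
      rw [gt_iff_lt, PySem.Int.floordiv_lt_iff_lt_mul (by norm_num)]
      calc num < (2:Int) ^ (i + 1 + 1) := hsmall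
        _ = 2 ^ (i + 1) * 2 := by ring
    have hg1 : (2:Int) ^ (i + 1 + 1) > num := hsmall
    rw [fLoop_eq num 0 (i + 1), if_pos hg1,
        fLoop_eq (PySem.Int.floordiv num 2) 0 i, if_pos hg2]
    ring
  | succ k ih =>
    intro i hk
    by_cases hbig : (2:Int) ^ (i + 1 + 1) ≤ num
    · have hg1 : ¬ ((2:Int) ^ (i + 1 + 1) > num) := by push_neg; exact hbig
      have hg2 : ¬ ((2:Int) ^ (i + 1) > PySem.Int.floordiv num 2) := by
        push_neg
        rw [PySem.Int.le_floordiv_iff_mul_le (by norm_num)]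
        calc (2:Int) ^ (i + 1) * 2 = 2 ^ (i + 1 + 1) := by ring
          _ ≤ num := hbig
      rw [fLoop_eq num 0 (i + 1), if_neg hg1,
          fLoop_eq (PySem.Int.floordiv num 2) 0 i, if_neg hg2]
      rw [fLoop_acc, fLoop_acc (PySem.Int.floordiv num 2)]
      -- the quotients agree: (num // 2) // 2^(i+1) = num // 2^(i+2)
      have hq : PySem.Int.floordiv (PySem.Int.floordiv num 2) ((2:Int) ^ (i + 1))
          = PySem.Int.floordiv num ((2:Int) ^ (i + 1 + 1)) := by
        rw [PySem.Int.floordiv_eq_ediv_of_pos (a := num) (b := 2) (by norm_num),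
            PySem.Int.floordiv_eq_ediv_of_pos (by positivity),
            PySem.Int.floordiv_eq_ediv_of_pos (by positivity)]
        rw [Int.ediv_ediv_of_nonneg]
        · congr 1; ring
        · norm_num
      have hw1 : PySem.Int.floordiv ((2:Int) ^ (i + 1 + 1)) 2 = (2:Int) ^ (i + 1) := by
        rw [PySem.Int.floordiv_eq_ediv_of_pos (by norm_num), pow_succ,
            Int.mul_ediv_cancel _ (by norm_num)]
      have hw2 : PySem.Int.floordiv ((2:Int) ^ (i + 1)) 2 = (2:Int) ^ i := by
        rw [PySem.Int.floordiv_eq_ediv_of_pos (by norm_num), pow_succ,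
            Int.mul_ediv_cancel _ (by norm_num)]
      have hmeas : num.toNat / 2 ^ (i + 1) ≤ k := by
        have h21 : (2:Int) ^ (i + 1) ≤ num :=
          le_trans (pow_le_pow_right₀ (by norm_num) (by omega)) hbig
        have := div_pow_lt h21; omega
      rw [ih (i + 1) hmeas, hq, hw1, hw2]
      ring
    · push_neg at hbig
      have hg2 : (2:Int) ^ (i + 1) > PySem.Int.floordiv num 2 := by
        rw [gt_iff_lt, PySem.Int.floordiv_lt_iff_lt_mul (by norm_num)]
        calc num < (2:Int) ^ (i + 1 + 1) := hbig
          _ = 2 ^ (i + 1) * 2 := by ring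
      have hg1 : (2:Int) ^ (i + 1 + 1) > num := hbig
      rw [fLoop_eq num 0 (i + 1), if_pos hg1,
          fLoop_eq (PySem.Int.floordiv num 2) 0 i, if_pos hg2]
      ring

theorem f_eq_f_alt_aux (k : Nat) : ∀ num : Int, num.toNat ≤ k → f num = f_alt num := by
  induction k with
  | zero =>
    intro num hk
    have hlt : (2:Int) ^ (0 + 1) > num := by norm_num; omega
    rw [f, fLoop_eq num num 0, if_pos hlt, f_alt, if_pos (by omega)]
  | succ k ih =>
    intro num hk
    by_cases hlt : num < 2
    · rw [f, fLoop_eq num num 0, if_pos (by norm_num; omega), f_alt, if_pos hlt]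
    · push_neg at hlt
      set h := PySem.Int.floordiv num 2 with hh
      have hdiv : h = num / 2 := PySem.Int.floordiv_eq_ediv_of_pos (by norm_num)
      have hmeas : h.toNat ≤ k := by rw [hdiv]; omega
      have ihh : f h = f_alt h := ih h hmeas
      have hfh : fLoop h h 0 = h + fLoop h 0 0 := fLoop_acc h h 0
      rw [f, fLoop_eq num num 0, if_neg (by norm_num; omega)]
      rw [fLoop_acc, fLoop_shift num num.toNat 0 (by simp)]
      rw [f_alt, if_neg (by omega)]
      have hw : PySem.Int.floordiv ((2:Int) ^ (0 + 1)) 2 = 1 := by decide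
      have h21 : PySem.Int.floordiv num ((2:Int) ^ (0 + 1)) = h := by norm_num [hh]
      rw [hw, h21]
      have hfa : f_alt h = h + fLoop h 0 0 := by rw [← ihh, f, hfh]
      simp only [← hh, hfa]
      ring

theorem f_eq_f_alt (num : Int) : f num = f_alt num :=
  f_eq_f_alt_aux num.toNat num le_rfl

-- ===== VERDICT (by name: the statement is the Claim_ definition above) =====
theorem f_spec : Claim_equal_f := by
  intro num _
  show f num = f_alt num
  exact f_eq_f_alt num
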